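-- pv_equiv track=rewrite | github.com/blandfort/perspectival | perspectival/util.py | truncate_at_stopping_strings
-- ===== SOURCE A (Python) =====
-- from typing import List
--
-- def truncate_at_stopping_strings(
--     text: str, stopping_strings: List[str], look_forward: bool = False
-- ):
--     """Return the part of `text` until any of the substrings in `stopping_strings`
--     occurred.
--
--     Arguments:
--     :text: Text to truncate
--     :stopping_strings: List of strings. The text is truncated at the earliest
--         occurrence of any of these strings
--     :look_forward: If True, the stopping string is not included in the truncated text"""
--     string_positions = [text.find(s) for s in stopping_strings]
--     stopping_positions = [
--         text.find(stopping_string) + (len(stopping_string) if not look_forward else 0)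
--         for pos, stopping_string in zip(string_positions, stopping_strings)
--         if pos >= 0
--     ]
--     if len(stopping_positions) > 0:
--         stopping_position = min(stopping_positions)
--     else:
--         stopping_position = None
--     return text[:stopping_position]
-- ===== SOURCE B (Python) =====
-- from typing import List
--
-- def _hit(text, s, pos, look_forward):
--     if look_forward:
--         return text.startswith(s, pos)
--     return len(s) <= pos and text.startswith(s, pos - len(s))
--
-- def truncate_at_stopping_strings(
--     text: str, stopping_strings: List[str], look_forward: bool = False
-- ):
--     """Scan the cut positions of `text` left to right and return at the first
--     position where some stopping string starts (look_forward) or ends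
--     (otherwise); no find() and no min() over an intermediate list."""
--     for pos in range(len(text) + 1):
--         if any(_hit(text, s, pos, look_forward) for s in stopping_strings):
--             return text[:pos]
--     return text
-- ===== Notes on version B (the rewrite author's own statement) =====
-- stated objective: alternative
-- what changed: Instead of computing text.find once per pattern and taking min() over a candidate list, B scans the cut positions of the text left to right and returns at the first position where some stopping string ends (or starts, with look_forward); the scan stops at the earliest hit instead of searching the whole text for every pattern.
import Mathlib
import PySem

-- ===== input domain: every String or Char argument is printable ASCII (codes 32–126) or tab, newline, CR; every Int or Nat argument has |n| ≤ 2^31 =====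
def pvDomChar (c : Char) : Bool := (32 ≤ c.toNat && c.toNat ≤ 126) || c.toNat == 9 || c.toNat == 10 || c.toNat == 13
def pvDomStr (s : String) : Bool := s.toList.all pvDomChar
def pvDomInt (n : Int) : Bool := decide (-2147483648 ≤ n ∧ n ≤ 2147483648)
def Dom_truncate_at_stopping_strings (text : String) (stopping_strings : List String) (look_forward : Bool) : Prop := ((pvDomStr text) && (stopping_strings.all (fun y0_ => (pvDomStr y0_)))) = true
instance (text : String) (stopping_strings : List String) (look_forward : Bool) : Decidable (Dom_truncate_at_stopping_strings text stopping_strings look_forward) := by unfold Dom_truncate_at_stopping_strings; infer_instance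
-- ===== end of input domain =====

-- B scans the cut positions of the text left to right and returns at the first position where
-- some stopping string ends (or starts, with look_forward), instead of A's find-per-pattern
-- plus min() over a candidate list; same return value (objective: alternative).

-- ===== PORT A =====
def truncate_at_stopping_strings (text : String) (stopping_strings : List String) (look_forward : Bool) : String :=
  let string_positions := stopping_strings.map (fun s => PySem.Str.find text s)
  let stopping_positions :=
    ((string_positions.zip stopping_strings).filter (fun ps => decide (0 ≤ ps.1))).map
      (fun ps => PySem.Str.find text ps.2 + (if !look_forward then PySem.Str.len ps.2 else 0))
  let stopping_position : Option Int :=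
    if stopping_positions.length > 0 then PySem.List.min? stopping_positions (fun x => x) else none
  PySem.Str.slice text none stopping_position

-- ===== PORT B =====
-- text.startswith(s, pos): hand port, exact for 0 ≤ pos (the only calls B makes)
def pvStartsAt (tl s : List Char) (pos : Int) : Bool :=
  s.isPrefixOf (tl.drop pos.toNat)

def pvHit (tl s : List Char) (pos : Int) (look_forward : Bool) : Bool :=
  if look_forward then pvStartsAt tl s pos
  else decide ((s.length : Int) ≤ pos) && pvStartsAt tl s (pos - s.length)

-- the 'for pos in range(len(text)+1): if any(...): return text[:pos]' loop with early return
def pvScan (text : String) (stopping_strings : List String) (look_forward : Bool) : List Int → String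
  | [] => text
  | pos :: rest =>
      if stopping_strings.any (fun s => pvHit text.toList s.toList pos look_forward)
      then PySem.Str.slice text none (some pos)
      else pvScan text stopping_strings look_forward rest

def truncate_at_stopping_strings_alt (text : String) (stopping_strings : List String) (look_forward : Bool) : String :=
  pvScan text stopping_strings look_forward (PySem.List.pyRange 0 (PySem.Str.len text + 1) 1)

-- ===== PRECONDITION & SPEC =====
def Spec_truncate_at_stopping_strings (text : String) (stopping_strings : List String) (look_forward : Bool) (out : String) : Prop := out = truncate_at_stopping_strings_alt text stopping_strings look_forward
instance (text : String) (stopping_strings : List String) (look_forward : Bool) (out : String) : Decidable (Spec_truncate_at_stopping_strings text stopping_strings look_forward out) := by unfold Spec_truncate_at_stopping_strings; infer_instance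

-- ===== CLAIM (what is proved, stated in full; the proofs are below) =====
def Claim_equal_truncate_at_stopping_strings : Prop := ∀ (text : String) (stopping_strings : List String) (look_forward : Bool), Dom_truncate_at_stopping_strings text stopping_strings look_forward → Spec_truncate_at_stopping_strings text stopping_strings look_forward (truncate_at_stopping_strings text stopping_strings look_forward)

-- ===== LEMMAS AND PROOFS =====

-- A's cut candidate for a pattern s
def pvCand (text s : String) (look_forward : Bool) : Int :=
  PySem.Str.find text s + (if !look_forward then PySem.Str.len s else 0)

-- A's zip-with-its-own-map comprehension is a plain filter-then-map over the strings
theorem pv_zip_filter_map (text : String) (look_forward : Bool) (l : List String) :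
    (((l.map (fun s => PySem.Str.find text s)).zip l).filter (fun ps => decide (0 ≤ ps.1))).map
        (fun ps => PySem.Str.find text ps.2 + (if !look_forward then PySem.Str.len ps.2 else 0))
      = (l.filter (fun s => decide (0 ≤ PySem.Str.find text s))).map
        (fun s => pvCand text s look_forward) := by
  induction l with
  | nil => simp
  | cons x t ih =>
    simp only [List.map_cons, List.zip_cons_cons, List.filter_cons]
    by_cases hx : 0 ≤ PySem.Str.find text x
    · have hd : decide (0 ≤ PySem.Str.find text x) = true := decide_eq_true hx
      rw [if_pos hd, if_pos hd, List.map_cons, List.map_cons, ih]; rfl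
    · have hd : ¬ (decide (0 ≤ PySem.Str.find text x) = true) := by
        simp only [decide_eq_true_eq]; exact hx
      rw [if_neg hd, if_neg hd, ih]

-- a found pattern yields a candidate inside [0, len text] at which B's scan fires
theorem pv_cand_spec (text s : String) (look_forward : Bool)
    (h : 0 ≤ PySem.Str.find text s) :
    0 ≤ pvCand text s look_forward ∧ pvCand text s look_forward ≤ (text.toList.length : Int) ∧
      pvHit text.toList s.toList (pvCand text s look_forward) look_forward = true := by
  have hfind : PySem.Str.find text s = PySem.Chars.find text.toList s.toList := by simp [pysem]
  have hlens : PySem.Str.len s = (s.toList.length : Int) := by simp [pysem]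
  have h0 : 0 ≤ PySem.Chars.find text.toList s.toList := by rw [hfind] at h; exact h
  have hpre := (PySem.Chars.find_spec h0).1
  have hlp := hpre.length_le
  simp only [List.length_drop] at hlp
  have hnat : ((PySem.Chars.find text.toList s.toList).toNat : Int)
      = PySem.Chars.find text.toList s.toList := Int.toNat_of_nonneg h0
  have hle := PySem.Chars.find_le_length text.toList s.toList
  unfold pvCand pvHit pvStartsAt
  rw [hfind, hlens]
  cases look_forward with
  | true =>
    simp only [Bool.not_true, Bool.false_eq_true, if_false, add_zero, if_true]
    refine ⟨h0, by omega, ?_⟩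
    exact List.isPrefixOf_iff_prefix.mpr hpre
  | false =>
    simp only [Bool.not_false, if_true, Bool.false_eq_true, if_false]
    refine ⟨by omega, by omega, ?_⟩
    rw [Bool.and_eq_true, decide_eq_true_eq]
    constructor
    · omega
    · have : PySem.Chars.find text.toList s.toList + (s.toList.length : Int) - s.toList.length
          = PySem.Chars.find text.toList s.toList := by ring
      rw [this, hnat] at *
      exact List.isPrefixOf_iff_prefix.mpr hpre

-- wherever B's scan fires, some pattern has a candidate at most that position
theorem pv_hit_cand (text : String) (stopping_strings : List String) (look_forward : Bool)
    (e : Int) (he : 0 ≤ e)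
    (h : stopping_strings.any (fun s => pvHit text.toList s.toList e look_forward) = true) :
    ∃ s ∈ stopping_strings, 0 ≤ PySem.Str.find text s ∧ pvCand text s look_forward ≤ e := by
  obtain ⟨s, hs, hhit⟩ := List.any_eq_true.mp h
  refine ⟨s, hs, ?_⟩
  have hfind : PySem.Str.find text s = PySem.Chars.find text.toList s.toList := by simp [pysem]
  have hlens : PySem.Str.len s = (s.toList.length : Int) := by simp [pysem]
  unfold pvHit pvStartsAt at hhit
  unfold pvCand
  rw [hfind, hlens]
  cases look_forward with
  | true =>
    simp only [if_true] at hhit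
    have hpre : s.toList <+: text.toList.drop e.toNat := List.isPrefixOf_iff_prefix.mp hhit
    have hocc : 0 ≤ PySem.Chars.find text.toList s.toList := by
      rw [PySem.Chars.find_nonneg_iff]
      exact hpre.isInfix.trans (List.drop_suffix _ _).isInfix
    have hmin := (PySem.Chars.find_spec hocc).2
    have hle : (PySem.Chars.find text.toList s.toList).toNat ≤ e.toNat := by
      by_contra hgt
      exact hmin e.toNat (by omega) hpre
    simp only [Bool.not_true, Bool.false_eq_true, if_false, add_zero]
    omega
  | false =>
    simp only [Bool.false_eq_true, if_false, Bool.and_eq_true, decide_eq_true_eq] at hhit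
    obtain ⟨hlen, hhit⟩ := hhit
    have hpre : s.toList <+: text.toList.drop (e - s.toList.length).toNat :=
      List.isPrefixOf_iff_prefix.mp hhit
    have hocc : 0 ≤ PySem.Chars.find text.toList s.toList := by
      rw [PySem.Chars.find_nonneg_iff]
      exact hpre.isInfix.trans (List.drop_suffix _ _).isInfix
    have hmin := (PySem.Chars.find_spec hocc).2
    have hle : (PySem.Chars.find text.toList s.toList).toNat ≤ (e - s.toList.length).toNat := by
      by_contra hgt
      exact hmin (e - s.toList.length).toNat (by omega) hpre
    simp only [Bool.not_false, if_true]
    omega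

-- the minimum of a nonempty Int list is a member below all members
theorem pv_foldl_min_spec (c : Int) (t : List Int) :
    t.foldl min c ∈ c :: t ∧ ∀ x ∈ c :: t, t.foldl min c ≤ x := by
  induction t generalizing c with
  | nil => simp
  | cons y t ih =>
    obtain ⟨hmem, hle⟩ := ih (min c y)
    simp only [List.foldl_cons]
    constructor
    · rcases List.mem_cons.mp hmem with h | h
      · rw [h]
        rcases min_choice c y with hc | hc <;> rw [hc] <;> simp
      · exact List.mem_cons_of_mem _ (List.mem_cons_of_mem _ h)
    · have h0 : t.foldl min (min c y) ≤ min c y := hle (min c y) (List.mem_cons_self ..)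
      intro x hx
      rcases List.mem_cons.mp hx with rfl | hx
      · exact le_trans h0 (min_le_left _ _)
      rcases List.mem_cons.mp hx with rfl | hx
      · exact le_trans h0 (min_le_right _ _)
      · exact hle _ (List.mem_cons_of_mem _ hx)

-- B's scan over an explicit list of positions is the first-hit search
theorem pv_scan_none (text : String) (stopping_strings : List String) (look_forward : Bool)
    (L : List Int)
    (h : ∀ e ∈ L, stopping_strings.any (fun s => pvHit text.toList s.toList e look_forward) = false) :
    pvScan text stopping_strings look_forward L = text := by
  induction L with
  | nil => rfl
  | cons e rest ih =>
    unfold pvScan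
    rw [h e (by simp), if_neg (by simp)]
    exact ih (fun x hx => h x (List.mem_cons_of_mem _ hx))

theorem pv_scan_some (text : String) (stopping_strings : List String) (look_forward : Bool)
    (a b m : Int) (ham : a ≤ m) (hmb : m < b)
    (hm : stopping_strings.any (fun s => pvHit text.toList s.toList m look_forward) = true)
    (hmin : ∀ e, a ≤ e → e < m →
      stopping_strings.any (fun s => pvHit text.toList s.toList e look_forward) = false) :
    pvScan text stopping_strings look_forward (PySem.List.pyRange a b 1)
      = PySem.Str.slice text none (some m) := by
  have hab : a < b := lt_of_le_of_lt ham hmb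
  generalize hk : (b - a).toNat = k
  induction k generalizing a with
  | zero => omega
  | succ k ih =>
    rw [PySem.List.pyRange_one_cons hab]
    unfold pvScan
    by_cases hme : m = a
    · rw [← hme, hm, if_pos rfl]
    · rw [hmin a le_rfl (by omega), if_neg (by simp)]
      exact ih (a + 1) (by omega) (fun e he => hmin e (by omega)) (by omega) (by omega)

theorem truncate_at_stopping_strings_eq (text : String) (stopping_strings : List String)
    (look_forward : Bool) :
    truncate_at_stopping_strings text stopping_strings look_forward
      = truncate_at_stopping_strings_alt text stopping_strings look_forward := by
  simp only [truncate_at_stopping_strings, truncate_at_stopping_strings_alt]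
  rw [pv_zip_filter_map text look_forward stopping_strings]
  have hlen : PySem.Str.len text = (text.toList.length : Int) := by simp [pysem]
  cases hcs : (stopping_strings.filter (fun s => decide (0 ≤ PySem.Str.find text s))).map
      (fun s => pvCand text s look_forward) with
  | nil =>
    -- no candidate: A slices with none (whole text); B never fires and returns text
    simp only [List.length_nil, gt_iff_lt, lt_self_iff_false, if_false]
    rw [pv_scan_none]
    · apply String.toList_inj.mp
      rw [PySem.Str.toList_slice, PySem.Chars.slice_eq_listSlice, PySem.List.slice_none_none]
    · intro e he
      by_contra hne
      have hhit : stopping_strings.any (fun s => pvHit text.toList s.toList e look_forward) = true := by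
        cases hv : stopping_strings.any (fun s => pvHit text.toList s.toList e look_forward)
        · exact absurd hv hne
        · rfl
      have he0 : 0 ≤ e := by
        have := (PySem.List.mem_pyRange_one).mp he; omega
      obtain ⟨s, hs, hf, _⟩ := pv_hit_cand text stopping_strings look_forward e he0 hhit
      have : pvCand text s look_forward ∈
          (stopping_strings.filter (fun s => decide (0 ≤ PySem.Str.find text s))).map
            (fun s => pvCand text s look_forward) :=
        List.mem_map_of_mem (List.mem_filter.mpr ⟨hs, decide_eq_true hf⟩)
      rw [hcs] at this
      exact absurd this (List.not_mem_nil)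
  | cons c t =>
    -- some candidate: A slices at the minimal candidate m; B's scan first fires exactly at m
    rw [if_pos (by simp), PySem.List.min?_id_cons]
    obtain ⟨hmem, hle⟩ := pv_foldl_min_spec c t
    set m := t.foldl min c with hm
    have hmC : ∀ x ∈ c :: t, ∃ s ∈ stopping_strings, 0 ≤ PySem.Str.find text s ∧
        x = pvCand text s look_forward := by
      intro x hx
      rw [← hcs] at hx
      obtain ⟨s, hs, rfl⟩ := List.mem_map.mp hx
      have hsf := List.mem_filter.mp hs
      exact ⟨s, hsf.1, by simpa using hsf.2, rfl⟩
    obtain ⟨s0, hs0, hf0, hx0⟩ := hmC m hmem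
    have hspec := pv_cand_spec text s0 look_forward hf0
    rw [← hx0] at hspec
    obtain ⟨h0m, hmn, hhitm⟩ := hspec
    rw [hlen]
    symm
    apply pv_scan_some text stopping_strings look_forward 0 (text.toList.length + 1) m h0m
      (by omega)
    · exact List.any_eq_true.mpr ⟨s0, hs0, hhitm⟩
    · intro e he0 hem
      by_contra hne
      have hhit : stopping_strings.any (fun s => pvHit text.toList s.toList e look_forward) = true := by
        cases hv : stopping_strings.any (fun s => pvHit text.toList s.toList e look_forward)
        · exact absurd hv hne
        · rfl
      obtain ⟨s, hs, hf, hcle⟩ := pv_hit_cand text stopping_strings look_forward e he0 hhit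
      have hmemc : pvCand text s look_forward ∈ c :: t := by
        rw [← hcs]
        exact List.mem_map_of_mem (List.mem_filter.mpr ⟨hs, decide_eq_true hf⟩)
      have := hle _ hmemc
      omega

-- ===== VERDICT (by name: the statement is the Claim_ definition above) =====
theorem truncate_at_stopping_strings_spec : Claim_equal_truncate_at_stopping_strings := by
  intro text stopping_strings look_forward _
  exact truncate_at_stopping_strings_eq text stopping_strings look_forward
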